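-- pv_equiv track=rewrite | github.com/armcoincrypto/Swaperex | src/swaperex/web/services/swap_service.py | _detect_chain
-- ===== SOURCE A (Python) =====
-- from typing import Optional
--
-- def _detect_chain(
--
--     from_asset: str,
--     to_asset: str,
--     preferred: Optional[str],
-- ) -> Optional[str]:
--     """Detect the appropriate chain for the swap."""
--     if preferred:
--         return preferred.lower()
--
--     # Simple chain detection based on asset
--     if any(a in ("BNB", "CAKE", "BUSD") for a in (from_asset, to_asset)):
--         return "bsc"
--     if any(a in ("MATIC", "QUICK") for a in (from_asset, to_asset)):
--         return "polygon"
--     if any(a in ("AVAX", "JOE") for a in (from_asset, to_asset)):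
--         return "avalanche"
--
--     # Default to Ethereum for ERC-20 tokens
--     return "ethereum"
-- ===== SOURCE B (Python) =====
-- from typing import Optional
--
-- # Tokens listed in chain-priority order; chain of tokens[i] is _CHAINS[i].
-- _TOKENS = ("BNB", "CAKE", "BUSD", "MATIC", "QUICK", "AVAX", "JOE")
-- _CHAINS = ("bsc", "bsc", "bsc", "polygon", "polygon", "avalanche", "avalanche")
--
--
-- def _rank(asset: str) -> int:
--     """Priority rank of an asset: its index in _TOKENS, or len(_TOKENS) if unknown."""
--     try:
--         return _TOKENS.index(asset)
--     except ValueError: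
--         return len(_TOKENS)
--
--
-- def _detect_chain(
--     from_asset: str,
--     to_asset: str,
--     preferred: Optional[str],
-- ) -> Optional[str]:
--     """Detect the appropriate chain for the swap."""
--     if preferred:
--         return preferred.lower()
--     r = min(_rank(from_asset), _rank(to_asset))
--     return _CHAINS[r] if r < len(_TOKENS) else "ethereum"
-- ===== Notes on version B (the rewrite author's own statement) =====
-- stated objective: alternative
-- what changed: Replaces the cascade of three boolean membership tests with a numeric priority rank (index in a priority-ordered token tuple, len for unknown); the answer is the chain at the minimum of the two ranks, with rank = len meaning ethereum.
import Mathlib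
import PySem

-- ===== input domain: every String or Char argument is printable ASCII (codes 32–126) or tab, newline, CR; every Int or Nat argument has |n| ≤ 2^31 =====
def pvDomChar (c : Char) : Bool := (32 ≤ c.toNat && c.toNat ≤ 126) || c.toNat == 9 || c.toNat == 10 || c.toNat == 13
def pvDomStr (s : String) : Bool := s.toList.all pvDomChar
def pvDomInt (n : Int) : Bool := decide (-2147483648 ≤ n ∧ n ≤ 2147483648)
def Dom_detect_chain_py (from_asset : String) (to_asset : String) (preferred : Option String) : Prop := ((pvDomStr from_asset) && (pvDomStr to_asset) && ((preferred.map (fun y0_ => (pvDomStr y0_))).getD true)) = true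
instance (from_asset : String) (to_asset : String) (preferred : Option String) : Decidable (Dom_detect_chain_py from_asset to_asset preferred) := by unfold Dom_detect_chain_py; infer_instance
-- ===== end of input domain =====

-- B replaces A's cascade of membership tests by a numeric priority rank (index in a
-- priority-ordered token list) and takes the minimum rank (objective: alternative).

-- ===== PORT A =====
-- fall-through body of A after the `if preferred` guard (three membership chains)
def detectChainBodyA (from_asset : String) (to_asset : String) : Option String :=
  if [from_asset, to_asset].any (fun a => ["BNB", "CAKE", "BUSD"].contains a) then some "bsc"
  else if [from_asset, to_asset].any (fun a => ["MATIC", "QUICK"].contains a) then some "polygon"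
  else if [from_asset, to_asset].any (fun a => ["AVAX", "JOE"].contains a) then some "avalanche"
  else some "ethereum"

def detect_chain_py (from_asset : String) (to_asset : String) (preferred : Option String) : Option String :=
  match preferred with
  | some s => if s ≠ "" then some (PySem.Str.lower s) else detectChainBodyA from_asset to_asset
  | none => detectChainBodyA from_asset to_asset

-- ===== PORT B =====
def tokensB : List String := ["BNB", "CAKE", "BUSD", "MATIC", "QUICK", "AVAX", "JOE"]
def chainsB : List String := ["bsc", "bsc", "bsc", "polygon", "polygon", "avalanche", "avalanche"]

-- _rank: tokens.index(asset), with the ValueError branch returning len(tokens)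
def rankB (asset : String) : Nat := (PySem.List.index? tokensB asset).getD tokensB.length

-- fall-through body of B: chain at the minimum of the two ranks
def detectChainBodyB (from_asset : String) (to_asset : String) : Option String :=
  let r := min (rankB from_asset) (rankB to_asset)
  if r < tokensB.length then some (chainsB.getD r "") else some "ethereum"
  -- r < length tokensB = length chainsB, so the getD default is never used (Python _CHAINS[r] is in range)

def detect_chain_py_alt (from_asset : String) (to_asset : String) (preferred : Option String) : Option String :=
  match preferred with
  | some s => if s ≠ "" then some (PySem.Str.lower s) else detectChainBodyB from_asset to_asset
  | none => detectChainBodyB from_asset to_asset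

-- ===== PRECONDITION & SPEC =====
def Spec_detect_chain_py (from_asset : String) (to_asset : String) (preferred : Option String) (out : Option String) : Prop := out = detect_chain_py_alt from_asset to_asset preferred
instance (from_asset : String) (to_asset : String) (preferred : Option String) (out : Option String) : Decidable (Spec_detect_chain_py from_asset to_asset preferred out) := by unfold Spec_detect_chain_py; infer_instance

-- ===== CLAIM (what is proved, stated in full; the proofs are below) =====
def Claim_equal_detect_chain_py : Prop := ∀ (from_asset : String) (to_asset : String) (preferred : Option String), Dom_detect_chain_py from_asset to_asset preferred → Spec_detect_chain_py from_asset to_asset preferred (detect_chain_py from_asset to_asset preferred)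

-- ===== LEMMAS AND PROOFS =====
theorem str_cases (f : String) : f = "BNB" ∨ f = "CAKE" ∨ f = "BUSD" ∨ f = "MATIC" ∨
    f = "QUICK" ∨ f = "AVAX" ∨ f = "JOE" ∨
    (f ≠ "BNB" ∧ f ≠ "CAKE" ∧ f ≠ "BUSD" ∧ f ≠ "MATIC" ∧ f ≠ "QUICK" ∧ f ≠ "AVAX" ∧ f ≠ "JOE") := by
  tauto

theorem rankB_unknown (f : String) (h1 : f ≠ "BNB") (h2 : f ≠ "CAKE") (h3 : f ≠ "BUSD")
    (h4 : f ≠ "MATIC") (h5 : f ≠ "QUICK") (h6 : f ≠ "AVAX") (h7 : f ≠ "JOE") :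
    rankB f = 7 := by
  have h : PySem.List.index? tokensB f = none := by
    rw [PySem.List.index?_eq_none_iff]
    simp [tokensB]
    tauto
  unfold rankB
  rw [h]
  rfl

theorem rankB_BNB : rankB "BNB" = 0 := by decide
theorem rankB_CAKE : rankB "CAKE" = 1 := by decide
theorem rankB_BUSD : rankB "BUSD" = 2 := by decide
theorem rankB_MATIC : rankB "MATIC" = 3 := by decide
theorem rankB_QUICK : rankB "QUICK" = 4 := by decide
theorem rankB_AVAX : rankB "AVAX" = 5 := by decide
theorem rankB_JOE : rankB "JOE" = 6 := by decide

set_option maxHeartbeats 2000000 in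
theorem body_eq (f t : String) : detectChainBodyA f t = detectChainBodyB f t := by
  rcases str_cases f with rfl|rfl|rfl|rfl|rfl|rfl|rfl|hf <;>
  rcases str_cases t with rfl|rfl|rfl|rfl|rfl|rfl|rfl|ht <;>
  first
    | decide
    | simp_all [detectChainBodyA, detectChainBodyB, rankB_unknown,
        rankB_BNB, rankB_CAKE, rankB_BUSD, rankB_MATIC, rankB_QUICK, rankB_AVAX, rankB_JOE,
        tokensB, chainsB]

-- ===== VERDICT (by name: the statement is the Claim_ definition above) =====
theorem detect_chain_py_spec : Claim_equal_detect_chain_py := by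
  intro f t p _
  unfold Spec_detect_chain_py detect_chain_py detect_chain_py_alt
  cases p with
  | none => exact body_eq f t
  | some s =>
    by_cases h : s = "" <;> simp [h, body_eq f t]
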